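-- pv_equiv track=rewrite | github.com/greyllmmoder/python-aztec | aztec_py/core.py | get_data_codewords
-- ===== SOURCE A (Python) =====
-- def get_data_codewords(bits: str, codeword_size: int) -> list[int]:
--     """Get codewords stream from data bits sequence.
--     Bit stuffing and padding are used to avoid all-zero and all-ones codewords
--
--     :param bits: input data bits
--     :param codeword_size: codeword size in bits
--     :return: data codewords
--     """
--     codewords = []
--     sub_bits = ''
--     for bit in bits:
--         sub_bits += bit
--         # if first bits of sub sequence are zeros add 1 as a last bit
--         if len(sub_bits) == codeword_size - 1 and sub_bits.find('1') < 0: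
--             sub_bits += '1'
--         # if first bits of sub sequence are ones add 0 as a last bit
--         if len(sub_bits) == codeword_size - 1 and sub_bits.find('0') < 0:
--             sub_bits += '0'
--         # convert bits to decimal int and add to result codewords
--         if len(sub_bits) >= codeword_size:
--             codewords.append(int(sub_bits, 2))
--             sub_bits = ''
--     if sub_bits:
--         # update and add final bits
--         sub_bits = sub_bits.ljust(codeword_size, '1')
--         # change final bit to zero if all bits are ones
--         if sub_bits.find('0') < 0:
--             sub_bits = sub_bits[:-1] + '0'
--         codewords.append(int(sub_bits, 2))
--     return codewords
-- ===== SOURCE B (Python) =====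
-- def get_data_codewords(bits: str, codeword_size: int) -> list[int]:
--     """Block-consuming re-implementation: walk an index over `bits`, emitting one
--     codeword per step (stuffed, plain, or padded tail) with arithmetic stuffing,
--     instead of growing a sub_bits string character by character.
--     Nonpositive codeword sizes are treated as size 1 (one bit per codeword,
--     which also keeps the loop terminating)."""
--     w = max(codeword_size, 1)
--     out = []
--     i, n = 0, len(bits)
--     while i < n:
--         if w > 1 and n - i >= w - 1 and _uniform(bits[i:i + w - 1]):
--             # w-1 identical bits: stuff the complementary bit arithmetically
--             out.append(2 * _bin2int(bits[i:i + w - 1]) + (1 if bits[i] == '0' else 0))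
--             i += w - 1
--         elif n - i >= w:
--             out.append(_bin2int(bits[i:i + w]))
--             i += w
--         else:
--             tail = bits[i:] + '1' * (w - (n - i))
--             if '0' not in tail:
--                 tail = tail[:-1] + '0'
--             out.append(_bin2int(tail))
--             i = n
--     return out
--
--
-- def _uniform(s):
--     return all(c == s[0] for c in s)
--
--
-- def _bin2int(s):
--     v = 0
--     for c in s:
--         v = 2 * v + (c == '1')
--     return v
-- ===== Notes on version B (the rewrite author's own statement) =====
-- stated objective: alternative
-- what changed: Replaces A's character-by-character accumulation into a growing sub_bits string (with in-loop stuffing checks) by an index that consumes one whole codeword block per step - slicing the block, detecting a uniform (w-1)-bit block and stuffing its complement arithmetically (2*v+bit) instead of by string concatenation, and padding the tail in one final branch.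
-- outside the precondition, e.g. on get_data_codewords('0_1', 3): A returns [1, 6], B returns [1]
import Mathlib
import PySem

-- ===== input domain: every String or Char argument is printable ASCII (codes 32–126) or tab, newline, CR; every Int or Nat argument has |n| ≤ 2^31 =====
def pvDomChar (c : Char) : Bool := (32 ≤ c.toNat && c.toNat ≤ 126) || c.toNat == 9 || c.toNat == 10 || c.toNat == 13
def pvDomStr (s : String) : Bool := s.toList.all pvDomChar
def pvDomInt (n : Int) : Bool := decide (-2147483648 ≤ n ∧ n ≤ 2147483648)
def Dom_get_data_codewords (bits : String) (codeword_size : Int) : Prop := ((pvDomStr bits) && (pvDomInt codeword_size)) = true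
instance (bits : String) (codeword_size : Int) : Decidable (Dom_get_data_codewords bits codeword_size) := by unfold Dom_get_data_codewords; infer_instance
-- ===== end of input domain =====

-- B consumes one whole codeword block per index step (with arithmetic bit stuffing) instead of
-- A's character-by-character accumulation into a growing sub_bits string; return values proved equal.


-- int(s, 2) on a binary string, MSB first (exact on Pre_'s binary-only domain; both Pythons
-- convert binary digit strings to ints: A via int(s, 2), B via its hand-written _bin2int)
def pvBin2Int (s : List Char) : Int :=
  s.foldl (fun v c => 2 * v + (if c = '1' then 1 else 0)) 0

-- ===== PORT A =====
-- A's loop body: sub_bits += bit; the two stuffing checks; emit when len(sub_bits) >= codeword_size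
def pvStepA (cw : Int) (st : List Int × List Char) (bit : Char) : List Int × List Char :=
  let sub1 := st.2 ++ [bit]
  let sub2 := if (sub1.length : Int) = cw - 1 ∧ sub1.contains '1' = false then sub1 ++ ['1'] else sub1
  let sub3 := if (sub2.length : Int) = cw - 1 ∧ sub2.contains '0' = false then sub2 ++ ['0'] else sub2
  if cw ≤ (sub3.length : Int) then (st.1 ++ [pvBin2Int sub3], []) else (st.1, sub3)

-- A's final 'if sub_bits:' block: ljust(codeword_size, '1'), flip last bit to '0' if all ones
def pvFinalA (cw : Int) (st : List Int × List Char) : List Int :=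
  if st.2 = [] then st.1
  else
    let sub1 := st.2 ++ List.replicate (cw - st.2.length).toNat '1'
    let sub2 := if sub1.contains '0' = false then sub1.dropLast ++ ['0'] else sub1
    st.1 ++ [pvBin2Int sub2]

def get_data_codewords (bits : String) (codeword_size : Int) : List Int :=
  pvFinalA codeword_size (bits.toList.foldl (pvStepA codeword_size) ([], []))

-- ===== PORT B =====
-- B's helper _uniform(s): all characters equal to the first
def pvUniform (s : List Char) : Bool :=
  match s with
  | [] => true
  | c :: _ => s.all (fun x => x = c)

-- B's while loop over index i, written as recursion on the remaining suffix; the fuel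
-- argument only drives termination (each step consumes at least one character since w ≥ 1,
-- so fuel = |bits| suffices and is never exhausted)
def pvAltGo (w : Int) : Nat → List Char → List Int
  | _, [] => []
  | 0, _ :: _ => []
  | fuel + 1, c :: rest =>
    if 1 < w ∧ w - 1 ≤ ((c :: rest).length : Int) ∧ pvUniform ((c :: rest).take (w - 1).toNat) = true then
      (2 * pvBin2Int ((c :: rest).take (w - 1).toNat) + (if c = '0' then 1 else 0))
        :: pvAltGo w fuel ((c :: rest).drop (w - 1).toNat)
    else if w ≤ ((c :: rest).length : Int) then
      pvBin2Int ((c :: rest).take w.toNat) :: pvAltGo w fuel ((c :: rest).drop w.toNat)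
    else
      let t1 := (c :: rest) ++ List.replicate (w - (c :: rest).length).toNat '1'
      [pvBin2Int (if t1.contains '0' = false then t1.dropLast ++ ['0'] else t1)]

def get_data_codewords_alt (bits : String) (codeword_size : Int) : List Int :=
  pvAltGo (max codeword_size 1) bits.toList.length bits.toList

-- ===== PRECONDITION & SPEC =====
-- Pre_ excludes bits containing a non-'0'/'1' character: on almost all of them A raises ValueError at
-- int(sub_bits, 2), except that int() tolerates '_' between digits, an accident of int-literal parsing
-- on which neither program's value is specified.
def Pre_get_data_codewords (bits : String) (codeword_size : Int) : Prop :=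
  (bits.toList.all fun c => c = '0' ∨ c = '1') = true
instance (bits : String) (codeword_size : Int) : Decidable (Pre_get_data_codewords bits codeword_size) := by unfold Pre_get_data_codewords; infer_instance

def pvWitness_get_data_codewords : String × Int := ("0110100011", 4)

def Spec_get_data_codewords (bits : String) (codeword_size : Int) (out : List Int) : Prop := out = get_data_codewords_alt bits codeword_size
instance (bits : String) (codeword_size : Int) (out : List Int) : Decidable (Spec_get_data_codewords bits codeword_size out) := by unfold Spec_get_data_codewords; infer_instance

-- ===== CLAIM (what is proved, stated in full; the proofs are below) =====
def Claim_equal_get_data_codewords : Prop := ∀ (bits : String) (codeword_size : Int), Dom_get_data_codewords bits codeword_size → Pre_get_data_codewords bits codeword_size → Spec_get_data_codewords bits codeword_size (get_data_codewords bits codeword_size)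

-- ===== LEMMAS AND PROOFS =====

theorem pvBin2Int_snoc (s : List Char) (c : Char) :
    pvBin2Int (s ++ [c]) = 2 * pvBin2Int s + (if c = '1' then 1 else 0) := by
  simp [pvBin2Int, List.foldl_append]

theorem pvStepA_fill (cw : Int) (acc : List Int) (sub : List Char) (c : Char)
    (hne : ((sub.length : Int) + 1) ≠ cw - 1) (hlt : (sub.length : Int) + 1 < cw) :
    pvStepA cw (acc, sub) c = (acc, sub ++ [c]) := by
  simp only [pvStepA]
  have e1 : (if ((sub ++ [c]).length : Int) = cw - 1 ∧ (sub ++ [c]).contains '1' = false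
      then sub ++ [c] ++ ['1'] else sub ++ [c]) = sub ++ [c] :=
    if_neg (fun h => hne (by simpa using h.1))
  rw [e1]
  have e2 : (if ((sub ++ [c]).length : Int) = cw - 1 ∧ (sub ++ [c]).contains '0' = false
      then sub ++ [c] ++ ['0'] else sub ++ [c]) = sub ++ [c] :=
    if_neg (fun h => hne (by simpa using h.1))
  rw [e2]
  rw [if_neg (by simp; omega)]

theorem pvStepA_emit (cw : Int) (acc : List Int) (sub : List Char) (c : Char)
    (hne : ((sub.length : Int) + 1) ≠ cw - 1) (hge : cw ≤ (sub.length : Int) + 1) :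
    pvStepA cw (acc, sub) c = (acc ++ [pvBin2Int (sub ++ [c])], []) := by
  simp only [pvStepA]
  have e1 : (if ((sub ++ [c]).length : Int) = cw - 1 ∧ (sub ++ [c]).contains '1' = false
      then sub ++ [c] ++ ['1'] else sub ++ [c]) = sub ++ [c] :=
    if_neg (fun h => hne (by simpa using h.1))
  rw [e1]
  have e2 : (if ((sub ++ [c]).length : Int) = cw - 1 ∧ (sub ++ [c]).contains '0' = false
      then sub ++ [c] ++ ['0'] else sub ++ [c]) = sub ++ [c] :=
    if_neg (fun h => hne (by simpa using h.1))
  rw [e2]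
  rw [if_pos (by simp; omega)]

theorem pvStepA_stuff0 (cw : Int) (acc : List Int) (sub : List Char) (c : Char)
    (hlen : ((sub.length : Int) + 1) = cw - 1) (h0 : ∀ x ∈ sub ++ [c], x = '0') :
    pvStepA cw (acc, sub) c = (acc ++ [2 * pvBin2Int (sub ++ [c]) + 1], []) := by
  have hm : '1' ∉ sub ++ [c] := by intro h; have := h0 _ h; simp at this
  simp only [pvStepA]
  have e1 : (if ((sub ++ [c]).length : Int) = cw - 1 ∧ (sub ++ [c]).contains '1' = false
      then sub ++ [c] ++ ['1'] else sub ++ [c]) = sub ++ [c] ++ ['1'] :=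
    if_pos ⟨by simpa using hlen, by simp only [List.contains_eq_mem]; exact decide_eq_false hm⟩
  rw [e1]
  have e2 : (if ((sub ++ [c] ++ ['1']).length : Int) = cw - 1 ∧ (sub ++ [c] ++ ['1']).contains '0' = false
      then sub ++ [c] ++ ['1'] ++ ['0'] else sub ++ [c] ++ ['1']) = sub ++ [c] ++ ['1'] :=
    if_neg (fun h => by have := h.1; simp at this; omega)
  rw [e2]
  rw [if_pos (by simp; omega)]
  rw [pvBin2Int_snoc]; norm_num

theorem pvStepA_stuff1 (cw : Int) (acc : List Int) (sub : List Char) (c : Char)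
    (hlen : ((sub.length : Int) + 1) = cw - 1) (h1 : ∀ x ∈ sub ++ [c], x = '1') :
    pvStepA cw (acc, sub) c = (acc ++ [2 * pvBin2Int (sub ++ [c])], []) := by
  have hm1 : '1' ∈ sub ++ [c] := by have := h1 c (by simp); simp [this]
  have hm0 : '0' ∉ sub ++ [c] := by intro h; have := h1 _ h; simp at this
  simp only [pvStepA]
  have e1 : (if ((sub ++ [c]).length : Int) = cw - 1 ∧ (sub ++ [c]).contains '1' = false
      then sub ++ [c] ++ ['1'] else sub ++ [c]) = sub ++ [c] :=
    if_neg (fun h => by have := h.2; simp only [List.contains_eq_mem] at this; simp [hm1] at this)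
  rw [e1]
  have e2 : (if ((sub ++ [c]).length : Int) = cw - 1 ∧ (sub ++ [c]).contains '0' = false
      then sub ++ [c] ++ ['0'] else sub ++ [c]) = sub ++ [c] ++ ['0'] :=
    if_pos ⟨by simpa using hlen, by simp only [List.contains_eq_mem]; exact decide_eq_false hm0⟩
  rw [e2]
  rw [if_pos (by simp; omega)]
  rw [pvBin2Int_snoc]; norm_num
  decide

theorem pvStepA_noStuff (cw : Int) (acc : List Int) (sub : List Char) (c : Char)
    (hlen : ((sub.length : Int) + 1) = cw - 1)
    (h0 : '0' ∈ sub ++ [c]) (h1 : '1' ∈ sub ++ [c]) :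
    pvStepA cw (acc, sub) c = (acc, sub ++ [c]) := by
  simp only [pvStepA]
  have e1 : (if ((sub ++ [c]).length : Int) = cw - 1 ∧ (sub ++ [c]).contains '1' = false
      then sub ++ [c] ++ ['1'] else sub ++ [c]) = sub ++ [c] :=
    if_neg (fun h => by have := h.2; simp only [List.contains_eq_mem] at this; simp [h1] at this)
  rw [e1]
  have e2 : (if ((sub ++ [c]).length : Int) = cw - 1 ∧ (sub ++ [c]).contains '0' = false
      then sub ++ [c] ++ ['0'] else sub ++ [c]) = sub ++ [c] :=
    if_neg (fun h => by have := h.2; simp only [List.contains_eq_mem] at this; simp [h0] at this)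
  rw [e2]
  rw [if_neg (by simp; omega)]

theorem pvFoldA_fill (cw : Int) : ∀ (d sub : List Char) (acc : List Int),
    ((sub.length : Int) + d.length ≤ cw - 1) →
    (((sub.length : Int) + d.length = cw - 1) → ('0' ∈ sub ++ d ∧ '1' ∈ sub ++ d)) →
    d.foldl (pvStepA cw) (acc, sub) = (acc, sub ++ d)
  | [], sub, acc, _, _ => by simp
  | c :: d', sub, acc, hle, hboth => by
    simp only [List.foldl_cons]
    have hstep : pvStepA cw (acc, sub) c = (acc, sub ++ [c]) := by
      by_cases h : ((sub.length : Int) + 1) = cw - 1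
      · have hd' : d' = [] := by
          cases d' with
          | nil => rfl
          | cons x xs => exfalso; simp at hle; omega
        subst hd'
        have hb := hboth (by simp; omega)
        exact pvStepA_noStuff cw acc sub c h (by simpa using hb.1) (by simpa using hb.2)
      · exact pvStepA_fill cw acc sub c h (by simp at hle; omega)
    rw [hstep]
    have := pvFoldA_fill cw d' (sub ++ [c]) acc
      (by simp at hle ⊢; omega)
      (by intro h; have hb := hboth (by simp at h ⊢; omega); simpa using hb)
    rw [this]
    simp

theorem pvBinNonUniform (d : List Char) (hbin : ∀ c ∈ d, c = '0' ∨ c = '1')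
    (hne : d ≠ []) (hu : pvUniform d = false) : '0' ∈ d ∧ '1' ∈ d := by
  match d, hne with
  | c :: rest, _ =>
    simp only [pvUniform, List.all_eq_false, decide_eq_true_eq] at hu
    obtain ⟨x, hx, hxc⟩ := hu
    have hcb := hbin c (by simp)
    have hxb := hbin x hx
    have hcm : c ∈ c :: rest := by simp
    rcases hcb with hc | hc <;> rcases hxb with hxx | hxx
    · exact absurd (hxx.trans hc.symm) hxc
    · exact ⟨hc ▸ hcm, hxx ▸ hx⟩
    · exact ⟨hxx ▸ hx, hc ▸ hcm⟩
    · exact absurd (hxx.trans hc.symm) hxc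

theorem pvMain (cw : Int) : ∀ (fuel : Nat) (l : List Char) (acc : List Int),
    (∀ c ∈ l, c = '0' ∨ c = '1') → l.length ≤ fuel →
    pvFinalA cw (l.foldl (pvStepA cw) (acc, [])) = acc ++ pvAltGo (max cw 1) fuel l := by
  intro fuel
  induction fuel with
  | zero =>
    intro l acc hbin hf
    have hl : l = [] := List.eq_nil_of_length_eq_zero (Nat.le_zero.mp hf)
    subst hl
    simp [pvFinalA, pvAltGo]
  | succ fuel ih =>
    intro l acc hbin hf
    match l with
    | [] => simp [pvFinalA, pvAltGo]
    | c :: rest =>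
      by_cases hS : 1 < max cw 1 ∧ max cw 1 - 1 ≤ (((c :: rest).length : Nat) : Int) ∧
          pvUniform ((c :: rest).take (max cw 1 - 1).toNat) = true
      · -- stuffed codeword: first max cw 1 - 1 bits are uniform
        have hcw : 1 < cw := by
          by_contra h
          rw [max_eq_right (by omega)] at hS
          exact absurd hS.1 (by norm_num)
        have hw : max cw 1 = cw := max_eq_left hcw.le
        rw [hw] at hS ⊢
        have hmInt : (((cw - 1).toNat : Nat) : Int) = cw - 1 := Int.toNat_of_nonneg (by omega)
        have hm1 : 1 ≤ (cw - 1).toNat := by omega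
        have hmlen : (cw - 1).toNat ≤ (c :: rest).length := by
          have h21 := hS.2.1; omega
        obtain ⟨mm, hmm⟩ : ∃ mm, (cw - 1).toNat = mm + 1 := ⟨(cw - 1).toNat - 1, by omega⟩
        have hchunkeq : (c :: rest).take ((cw - 1).toNat) = c :: rest.take mm := by
          rw [hmm, List.take_succ_cons]
        have hall : ∀ x ∈ (c :: rest).take ((cw - 1).toNat), x = c := by
          have hu := hS.2.2
          rw [hchunkeq] at hu ⊢
          simp only [pvUniform, List.all_eq_true, decide_eq_true_eq] at hu
          exact hu
        have hchunklen : ((c :: rest).take ((cw - 1).toNat)).length = (cw - 1).toNat := by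
          rw [List.length_take]; omega
        have hchunkne : (c :: rest).take ((cw - 1).toNat) ≠ [] := by rw [hchunkeq]; simp
        have hsplit := List.dropLast_append_getLast hchunkne
        have hfrontlen : (((c :: rest).take ((cw - 1).toNat)).dropLast).length = mm := by
          rw [List.length_dropLast, hchunklen]; omega
        have hfold0 : (((c :: rest).take ((cw - 1).toNat)).dropLast).foldl (pvStepA cw) (acc, []) =
            (acc, ((c :: rest).take ((cw - 1).toNat)).dropLast) := by
          have := pvFoldA_fill cw (((c :: rest).take ((cw - 1).toNat)).dropLast) [] acc
            (by have hfl := hfrontlen; simp only [List.length_nil, hfl]; omega)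
            (by have hfl := hfrontlen; simp only [List.length_nil, hfl]; intro h; exfalso; omega)
          simpa using this
        have hcbin : c = '0' ∨ c = '1' := hbin c (by simp)
        have hstepval : pvStepA cw (acc, ((c :: rest).take ((cw - 1).toNat)).dropLast)
              (((c :: rest).take ((cw - 1).toNat)).getLast hchunkne) =
            (acc ++ [2 * pvBin2Int ((c :: rest).take ((cw - 1).toNat)) +
              (if c = '0' then 1 else 0)], []) := by
          rcases hcbin with hc | hc
          · rw [if_pos hc]
            have h0 : ∀ x ∈ ((c :: rest).take ((cw - 1).toNat)).dropLast ++
                [((c :: rest).take ((cw - 1).toNat)).getLast hchunkne], x = '0' := by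
              rw [hsplit]; intro x hx; rw [hall x hx, hc]
            have := pvStepA_stuff0 cw acc (((c :: rest).take ((cw - 1).toNat)).dropLast)
              (((c :: rest).take ((cw - 1).toNat)).getLast hchunkne)
              (by have hfl := hfrontlen; rw [hfl]; omega) h0
            rw [this, hsplit]
          · rw [if_neg (by rw [hc]; decide)]
            have h1 : ∀ x ∈ ((c :: rest).take ((cw - 1).toNat)).dropLast ++
                [((c :: rest).take ((cw - 1).toNat)).getLast hchunkne], x = '1' := by
              rw [hsplit]; intro x hx; rw [hall x hx, hc]
            have := pvStepA_stuff1 cw acc (((c :: rest).take ((cw - 1).toNat)).dropLast)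
              (((c :: rest).take ((cw - 1).toNat)).getLast hchunkne)
              (by have hfl := hfrontlen; rw [hfl]; omega) h1
            rw [this, hsplit]
            simp
        have hfoldchunk : ((c :: rest).take ((cw - 1).toNat)).foldl (pvStepA cw) (acc, []) =
            (acc ++ [2 * pvBin2Int ((c :: rest).take ((cw - 1).toNat)) +
              (if c = '0' then 1 else 0)], []) := by
          conv_lhs => rw [← hsplit]
          rw [List.foldl_append, hfold0]
          simpa using hstepval
        have hfoldall : (c :: rest).foldl (pvStepA cw) (acc, []) =
            ((c :: rest).drop ((cw - 1).toNat)).foldl (pvStepA cw)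
              (acc ++ [2 * pvBin2Int ((c :: rest).take ((cw - 1).toNat)) +
                (if c = '0' then 1 else 0)], []) := by
          conv_lhs => rw [← List.take_append_drop ((cw - 1).toNat) (c :: rest)]
          rw [List.foldl_append, hfoldchunk]
        rw [hfoldall]
        have hih := ih ((c :: rest).drop ((cw - 1).toNat))
          (acc ++ [2 * pvBin2Int ((c :: rest).take ((cw - 1).toNat)) + (if c = '0' then 1 else 0)])
          (fun x hx => hbin x (List.drop_subset _ _ hx))
          (by rw [List.length_drop]; simp at hf ⊢; omega)
        rw [hw] at hih
        rw [hih]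
        simp only [pvAltGo]
        rw [if_pos hS]
        rw [List.append_assoc]
        rfl
      · by_cases hP : max cw 1 ≤ (((c :: rest).length : Nat) : Int)
        · -- plain codeword
          by_cases hcw1 : cw ≤ 1
          · -- codeword size ≤ 1 behaves as size 1: one bit per codeword
            have hw : max cw 1 = 1 := max_eq_right hcw1
            rw [hw] at hS hP ⊢
            have hstep : pvStepA cw (acc, []) c = (acc ++ [pvBin2Int [c]], []) := by
              have := pvStepA_emit cw acc [] c (by simp; omega) (by simp; omega)
              simpa using this
            have hih := ih rest (acc ++ [pvBin2Int [c]])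
              (fun x hx => hbin x (by simp [hx])) (by simp at hf ⊢; omega)
            rw [max_eq_right hcw1] at hih
            simp only [List.foldl_cons]
            rw [hstep, hih]
            simp only [pvAltGo]
            rw [if_neg (fun h => by norm_num at h), if_pos (by simp only [List.length_cons]; push_cast; omega)]
            norm_num
          · -- codeword size ≥ 2, non-uniform first cw-1 bits: emit cw bits
            have hw : max cw 1 = cw := max_eq_left (by omega)
            rw [hw] at hS hP ⊢
            have hu : pvUniform ((c :: rest).take ((cw - 1).toNat)) = false := by
              have hnt : ¬ pvUniform ((c :: rest).take ((cw - 1).toNat)) = true :=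
                fun h => hS ⟨by omega, by omega, h⟩
              revert hnt; cases pvUniform ((c :: rest).take ((cw - 1).toNat)) <;> simp
            have hmInt : (((cw - 1).toNat : Nat) : Int) = cw - 1 := Int.toNat_of_nonneg (by omega)
            have hmlt : (cw - 1).toNat < (c :: rest).length := by omega
            have hchunklen : ((c :: rest).take ((cw - 1).toNat)).length = (cw - 1).toNat := by
              rw [List.length_take]; omega
            have hchunkne : (c :: rest).take ((cw - 1).toNat) ≠ [] := by
              intro h
              have := congrArg List.length h
              rw [hchunklen] at this
              simp at this
              omega
            have hboth := pvBinNonUniform ((c :: rest).take ((cw - 1).toNat))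
              (fun x hx => hbin x (List.take_subset _ _ hx)) hchunkne hu
            have hcwm : cw.toNat = (cw - 1).toNat + 1 := by omega
            have htakefull : (c :: rest).take cw.toNat =
                (c :: rest).take ((cw - 1).toNat) ++ [(c :: rest)[(cw - 1).toNat]'hmlt] := by
              rw [hcwm, List.take_add_one, List.getElem?_eq_getElem hmlt]
              rfl
            have hfold0 : ((c :: rest).take ((cw - 1).toNat)).foldl (pvStepA cw) (acc, []) =
                (acc, (c :: rest).take ((cw - 1).toNat)) := by
              have := pvFoldA_fill cw ((c :: rest).take ((cw - 1).toNat)) [] acc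
                (by rw [List.length_nil, hchunklen]; omega)
                (by intro _; simpa using hboth)
              simpa using this
            have hstep : pvStepA cw (acc, (c :: rest).take ((cw - 1).toNat))
                  ((c :: rest)[(cw - 1).toNat]'hmlt) =
                (acc ++ [pvBin2Int ((c :: rest).take cw.toNat)], []) := by
              have := pvStepA_emit cw acc ((c :: rest).take ((cw - 1).toNat))
                ((c :: rest)[(cw - 1).toNat]'hmlt)
                (by rw [hchunklen]; omega)
                (by rw [hchunklen]; omega)
              rw [this, ← htakefull]
            have hfoldall : (c :: rest).foldl (pvStepA cw) (acc, []) =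
                ((c :: rest).drop cw.toNat).foldl (pvStepA cw)
                  (acc ++ [pvBin2Int ((c :: rest).take cw.toNat)], []) := by
              conv_lhs => rw [← List.take_append_drop cw.toNat (c :: rest)]
              rw [List.foldl_append, htakefull, List.foldl_append, hfold0]
              simp only [List.foldl_cons, List.foldl_nil]
              rw [hstep, htakefull]
            rw [hfoldall]
            have hih := ih ((c :: rest).drop cw.toNat)
              (acc ++ [pvBin2Int ((c :: rest).take cw.toNat)])
              (fun x hx => hbin x (List.drop_subset _ _ hx))
              (by rw [List.length_drop]; simp only [List.length_cons] at hf ⊢; omega)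
            rw [hw] at hih
            rw [hih]
            simp only [pvAltGo]
            rw [if_neg hS, if_pos hP]
            rw [List.append_assoc]
            rfl
        · -- tail: fewer than codeword_size bits remain, pad with ones
          have hcw2 : 2 ≤ cw := by
            by_contra h
            exact hP (by rw [max_eq_right (by omega)]; simp only [List.length_cons]; push_cast; omega)
          have hw : max cw 1 = cw := max_eq_left (by omega)
          rw [hw] at hS hP ⊢
          have hfold : (c :: rest).foldl (pvStepA cw) (acc, []) = (acc, c :: rest) := by
            have := pvFoldA_fill cw (c :: rest) [] acc
              (by simp only [List.length_nil]; push_cast at hP ⊢; omega)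
              (by
                intro heq
                simp only [List.length_nil] at heq
                have hmInt : (((cw - 1).toNat : Nat) : Int) = cw - 1 := Int.toNat_of_nonneg (by omega)
                have htk : (c :: rest).take ((cw - 1).toNat) = c :: rest := by
                  apply List.take_of_length_le
                  omega
                have hu : pvUniform ((c :: rest).take ((cw - 1).toNat)) = false := by
                  have hnt : ¬ pvUniform ((c :: rest).take ((cw - 1).toNat)) = true :=
                    fun h => hS ⟨by omega, by omega, h⟩
                  revert hnt; cases pvUniform ((c :: rest).take ((cw - 1).toNat)) <;> simp
                rw [htk] at hu
                have := pvBinNonUniform (c :: rest) hbin (by simp) hu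
                simpa using this)
            simpa using this
          rw [hfold]
          simp only [pvAltGo]
          rw [if_neg hS, if_neg hP]
          simp only [pvFinalA]
          rw [if_neg (by simp)]

-- ===== VERDICT (by name: the statement is the Claim_ definition above) =====
theorem get_data_codewords_spec : Claim_equal_get_data_codewords := by
  intro bits cw _ hpre
  unfold Spec_get_data_codewords get_data_codewords get_data_codewords_alt
  have hbin : ∀ c ∈ bits.toList, c = '0' ∨ c = '1' := by
    simpa [List.all_eq_true, Pre_get_data_codewords] using hpre
  simpa using pvMain cw bits.toList.length bits.toList [] hbin le_rfl
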